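-- pv_equiv track=rewrite | github.com/joshrobertson8/leetcode25 | array&string/1-easy/FruitsIntoBasketsII/FruitsIntoBasketsII.py | unplacedFruits
-- ===== SOURCE A (Python) =====
-- def unplacedFruits(fruits, baskets):
--     """
--     :type fruits: List[int]
--     :type baskets: List[int]
--     :rtype: int
--     """
--     res = 0
--     n = len(baskets)
--
--     for fruit in fruits:
--         unset = 1
--
--         for j in range(n):
--
--             if fruit <= baskets[j]:
--                 unset = 0
--                 baskets[j] = 0
--                 break
--         res += unset
--
--     return res
-- ===== SOURCE B (Python) =====
-- def _build(bs):
--     # recursive max-segment tree as nested tuples (mx, left, right); leaf has None children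
--     if len(bs) == 1:
--         return (bs[0], None, None)
--     k = len(bs) // 2
--     l = _build(bs[:k])
--     r = _build(bs[k:])
--     return (max(l[0], r[0]), l, r)
--
-- def _place(f, t):
--     # returns updated tree with the leftmost leaf >= f zeroed, or None if no leaf fits
--     mx, l, r = t
--     if l is None:
--         return (0, None, None) if f <= mx else None
--     if f <= l[0]:
--         nl = _place(f, l)
--         if nl is None:
--             return None
--         return (max(nl[0], r[0]), nl, r)
--     if f <= r[0]:
--         nr = _place(f, r)
--         if nr is None:
--             return None
--         return (max(l[0], nr[0]), l, nr)
--     return None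
--
-- def unplacedFruits(fruits, baskets):
--     if not baskets:
--         return len(fruits)
--     t = _build(baskets)
--     res = 0
--     for f in fruits:
--         nt = _place(f, t)
--         if nt is None:
--             res += 1
--         else:
--             t = nt
--     return res
-- ===== Notes on version B (the rewrite author's own statement) =====
-- stated objective: faster
-- what changed: Replaces the per-fruit linear scan of the baskets with a max-segment-tree built once over basket capacities, descending to the leftmost leaf with capacity >= fruit (zeroing it), so each fruit is placed in O(log m) instead of O(m); A mutates the baskets list in place, B does not (return value equivalence).
import Mathlib
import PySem

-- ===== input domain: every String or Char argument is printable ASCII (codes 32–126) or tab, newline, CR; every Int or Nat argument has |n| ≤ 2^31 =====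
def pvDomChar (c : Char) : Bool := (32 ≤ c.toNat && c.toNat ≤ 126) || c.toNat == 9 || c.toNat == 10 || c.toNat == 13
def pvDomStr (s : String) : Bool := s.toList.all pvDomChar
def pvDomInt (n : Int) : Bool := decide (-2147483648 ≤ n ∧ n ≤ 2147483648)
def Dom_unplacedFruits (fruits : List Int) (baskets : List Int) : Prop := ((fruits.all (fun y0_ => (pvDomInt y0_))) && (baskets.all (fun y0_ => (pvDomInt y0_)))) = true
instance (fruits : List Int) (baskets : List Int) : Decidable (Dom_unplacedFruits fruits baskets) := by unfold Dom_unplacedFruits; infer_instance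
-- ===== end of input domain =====

-- B replaces A's per-fruit linear scan with a max-segment-tree over basket capacities
-- (leftmost leaf ≥ fruit is zeroed), a faster algorithm; A mutates `baskets` in place,
-- B does not — the equivalence proved here is about the return value only.


-- ===== PORT A =====
-- A's inner `for j in range(n)` scan with break: recursion over the basket list,
-- returning (unset, updated baskets).
def placeA (fruit : Int) : List Int → Int × List Int
  | [] => (1, [])
  | b :: rest =>
    if fruit ≤ b then (0, (0 : Int) :: rest)
    else
      let p := placeA fruit rest
      (p.1, b :: p.2)

def unplacedFruits (fruits : List Int) (baskets : List Int) : Int :=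
  (fruits.foldl (fun st fruit =>
      let p := placeA fruit st.2
      (st.1 + p.1, p.2)) ((0 : Int), baskets)).1

-- ===== PORT B =====
-- segment-tree node: cached maximum, children (leaf = no children)
inductive STree where
  | leaf : Int → STree
  | node : Int → STree → STree → STree
deriving Repr

def STree.mx : STree → Int
  | .leaf v => v
  | .node m _ _ => m

-- Source B _build: split in half, cache max of children
def buildT (l : List Int) : Option STree :=
  if _h : l.length ≤ 1 then
    match l with
    | [] => none
    | v :: _ => some (.leaf v)
  else
    let k := l.length / 2
    match buildT (l.take k), buildT (l.drop k) with
    | some tl, some tr => some (.node (max tl.mx tr.mx) tl tr)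
    | _, _ => none
termination_by l.length
decreasing_by
  · simp [List.length_take]; omega
  · simp [List.length_drop]; omega

-- Source B _place: descend to the leftmost leaf with value ≥ f, zero it, recompute maxima
def placeT (f : Int) : STree → Option STree
  | .leaf v => if f ≤ v then some (.leaf 0) else none
  | .node _ l r =>
    if f ≤ l.mx then
      match placeT f l with
      | some l' => some (.node (max l'.mx r.mx) l' r)
      | none => none
    else if f ≤ r.mx then
      match placeT f r with
      | some r' => some (.node (max l.mx r'.mx) l r')
      | none => none
    else none

def unplacedFruits_alt (fruits : List Int) (baskets : List Int) : Int :=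
  match buildT baskets with
  | none => (fruits.length : Int)
  | some t =>
    (fruits.foldl (fun st f =>
        match placeT f st.2 with
        | none => (st.1 + 1, st.2)
        | some t' => (st.1, t')) ((0 : Int), t)).1

-- ===== PRECONDITION & SPEC =====
def Spec_unplacedFruits (fruits : List Int) (baskets : List Int) (out : Int) : Prop := out = unplacedFruits_alt fruits baskets
instance (fruits : List Int) (baskets : List Int) (out : Int) : Decidable (Spec_unplacedFruits fruits baskets out) := by unfold Spec_unplacedFruits; infer_instance

-- ===== CLAIM (what is proved, stated in full; the proofs are below) =====
def Claim_equal_unplacedFruits : Prop := ∀ (fruits : List Int) (baskets : List Int), Dom_unplacedFruits fruits baskets → Spec_unplacedFruits fruits baskets (unplacedFruits fruits baskets)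

-- ===== LEMMAS AND PROOFS =====

-- the list of leaf values of a tree, in order
def toL : STree → List Int
  | .leaf v => [v]
  | .node _ l r => toL l ++ toL r

-- well-formedness: each cached max is the max of the children's caches
def wfT : STree → Prop
  | .leaf _ => True
  | .node m l r => m = max l.mx r.mx ∧ wfT l ∧ wfT r

lemma le_mx_iff (f : Int) : ∀ t : STree, wfT t → (f ≤ t.mx ↔ ∃ b ∈ toL t, f ≤ b) := by
  intro t
  induction t with
  | leaf v => simp [STree.mx, toL]
  | node m l r ihl ihr =>
    rintro ⟨hm, hl, hr⟩
    have hmx : (STree.node m l r).mx = max l.mx r.mx := hm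
    rw [hmx]
    simp only [toL, List.mem_append, le_max_iff]
    rw [ihl hl, ihr hr]
    constructor
    · rintro (⟨b, hb, h⟩ | ⟨b, hb, h⟩) <;> exact ⟨b, by tauto, h⟩
    · rintro ⟨b, hb | hb, h⟩
      · exact Or.inl ⟨b, hb, h⟩
      · exact Or.inr ⟨b, hb, h⟩

lemma build_spec_aux : ∀ n : Nat, ∀ l : List Int, l.length ≤ n → l ≠ [] → ∃ t, buildT l = some t ∧ wfT t ∧ toL t = l := by
  intro n
  induction n with
  | zero =>
    intro l hlen hne
    cases l with
    | nil => exact absurd rfl hne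
    | cons a t => simp at hlen
  | succ n ih =>
    intro l hlen hne
    by_cases h1 : l.length ≤ 1
    · match l, hne with
      | [v], _ =>
        exact ⟨.leaf v, by rw [buildT]; simp, trivial, by simp [toL]⟩
      | a :: b :: t, _ => simp at h1
    · have hlen2 : 2 ≤ l.length := by omega
      have hk1 : 1 ≤ l.length / 2 := by omega
      have hk2 : l.length / 2 < l.length := by omega
      have hkt : (l.take (l.length / 2)).length = l.length / 2 :=
        List.length_take_of_le (by omega)
      obtain ⟨tl, hbl, hwl, htll⟩ := ih (l.take (l.length / 2))
        (by rw [hkt]; omega)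
        (by intro h; have := congrArg List.length h; rw [hkt] at this; simp at this; omega)
      obtain ⟨tr, hbr, hwr, htlr⟩ := ih (l.drop (l.length / 2))
        (by simp [List.length_drop]; omega)
        (by intro h; have := congrArg List.length h; simp [List.length_drop] at this; omega)
      refine ⟨.node (max tl.mx tr.mx) tl tr, ?_, ⟨rfl, hwl, hwr⟩, ?_⟩
      · rw [buildT]; simp only [dif_neg h1]; rw [hbl, hbr]
      · simp [toL, htll, htlr]

lemma build_spec (l : List Int) (hne : l ≠ []) : ∃ t, buildT l = some t ∧ wfT t ∧ toL t = l :=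
  build_spec_aux l.length l le_rfl hne

lemma placeA_all_lt (f : Int) : ∀ xs : List Int, (∀ b ∈ xs, ¬ f ≤ b) → placeA f xs = (1, xs) := by
  intro xs h
  induction xs with
  | nil => rfl
  | cons b rest ih =>
    have hb := h b (by simp)
    simp only [placeA, if_neg hb]
    rw [ih (fun x hx => h x (by simp [hx]))]

lemma placeA_fst_zero (f : Int) : ∀ xs : List Int, (∃ b ∈ xs, f ≤ b) → (placeA f xs).1 = 0 := by
  intro xs h
  induction xs with
  | nil => simp at h
  | cons b rest ih =>
    by_cases hb : f ≤ b
    · simp [placeA, hb]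
    · simp only [placeA, if_neg hb]
      apply ih
      rcases h with ⟨x, hx, hfx⟩
      rw [List.mem_cons] at hx
      rcases hx with h1 | h2
      · exact absurd (h1 ▸ hfx) hb
      · exact ⟨x, h2, hfx⟩

lemma placeA_append_left (f : Int) : ∀ xs xs' ys : List Int, placeA f xs = (0, xs') → placeA f (xs ++ ys) = (0, xs' ++ ys) := by
  intro xs
  induction xs with
  | nil => intro xs' ys h; simp [placeA] at h
  | cons b rest ih =>
    intro xs' ys h
    by_cases hb : f ≤ b
    · simp only [placeA, if_pos hb] at h
      injection h with _ h2
      subst h2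
      simp [placeA, hb]
    · simp only [placeA, if_neg hb] at h
      injection h with h1 h2
      subst h2
      have hrest : placeA f rest = (0, (placeA f rest).2) := by
        rw [← h1]
      simp only [List.cons_append, placeA, if_neg hb]
      rw [ih (placeA f rest).2 ys hrest]

lemma placeA_append_right (f : Int) : ∀ xs ys : List Int, (∀ b ∈ xs, ¬ f ≤ b) →
    placeA f (xs ++ ys) = ((placeA f ys).1, xs ++ (placeA f ys).2) := by
  intro xs ys h
  induction xs with
  | nil => simp
  | cons b rest ih =>
    have hb := h b (by simp)
    simp only [List.cons_append, placeA, if_neg hb]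
    rw [ih (fun x hx => h x (by simp [hx]))]

lemma place_spec (f : Int) : ∀ t : STree, wfT t →
    (placeT f t = none ∧ placeA f (toL t) = (1, toL t)) ∨
    (∃ t', placeT f t = some t' ∧ wfT t' ∧ placeA f (toL t) = (0, toL t')) := by
  intro t
  induction t with
  | leaf v =>
    intro _
    by_cases hv : f ≤ v
    · right; exact ⟨.leaf 0, by simp [placeT, hv], trivial, by simp [toL, placeA, hv]⟩
    · left; exact ⟨by simp [placeT, hv], by simp [toL, placeA, hv]⟩
  | node m l r ihl ihr =>
    rintro ⟨hm, hl, hr⟩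
    by_cases hfl : f ≤ l.mx
    · rcases ihl hl with ⟨hnone, heq⟩ | ⟨l', hsome, hw, heq⟩
      · -- impossible: f ≤ l.mx means some element fits
        exfalso
        have := placeA_fst_zero f (toL l) ((le_mx_iff f l hl).1 hfl)
        rw [heq] at this; simp at this
      · right
        refine ⟨.node (max l'.mx r.mx) l' r, by simp [placeT, hfl, hsome], ⟨rfl, hw, hr⟩, ?_⟩
        simpa [toL] using placeA_append_left f (toL l) (toL l') (toL r) heq
    · have hall : ∀ b ∈ toL l, ¬ f ≤ b := by
        intro b hb hfb
        exact hfl ((le_mx_iff f l hl).2 ⟨b, hb, hfb⟩)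
      by_cases hfr : f ≤ r.mx
      · rcases ihr hr with ⟨hnone, heq⟩ | ⟨r', hsome, hw, heq⟩
        · exfalso
          have := placeA_fst_zero f (toL r) ((le_mx_iff f r hr).1 hfr)
          rw [heq] at this; simp at this
        · right
          refine ⟨.node (max l.mx r'.mx) l r', by simp [placeT, hfl, hfr, hsome], ⟨rfl, hl, hw⟩, ?_⟩
          simp only [toL]
          rw [placeA_append_right f (toL l) (toL r) hall, heq]
      · left
        refine ⟨by simp [placeT, hfl, hfr], ?_⟩
        apply placeA_all_lt
        intro b hb hfb
        simp only [toL, List.mem_append] at hb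
        rcases hb with hb | hb
        · exact hall b hb hfb
        · exact hfr ((le_mx_iff f r hr).2 ⟨b, hb, hfb⟩)

lemma fold_eq (fruits : List Int) : ∀ (c : Int) (t : STree), wfT t →
    (fruits.foldl (fun st f =>
        match placeT f st.2 with
        | none => (st.1 + 1, st.2)
        | some t' => (st.1, t')) (c, t)).1 =
    (fruits.foldl (fun st fruit =>
        let p := placeA fruit st.2
        (st.1 + p.1, p.2)) (c, toL t)).1 := by
  induction fruits with
  | nil => intro c t _; rfl
  | cons f fs ih =>
    intro c t hw
    rcases place_spec f t hw with ⟨hnone, heq⟩ | ⟨t', hsome, hw', heq⟩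
    · simp only [List.foldl_cons, hnone, heq]
      exact ih (c + 1) t hw
    · simp only [List.foldl_cons, hsome, heq]
      have := ih c t' hw'
      simpa using this

lemma fold_nil (fruits : List Int) : ∀ c : Int,
    (fruits.foldl (fun st fruit =>
        let p := placeA fruit st.2
        (st.1 + p.1, p.2)) (c, ([] : List Int))).1 = c + fruits.length := by
  induction fruits with
  | nil => intro c; simp
  | cons f fs ih =>
    intro c
    simp only [List.foldl_cons, placeA]
    rw [ih (c + 1)]
    simp only [List.length_cons]
    push_cast
    ring

-- ===== VERDICT (by name: the statement is the Claim_ definition above) =====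
theorem unplacedFruits_spec : Claim_equal_unplacedFruits := by
  intro fruits baskets _
  unfold Spec_unplacedFruits unplacedFruits unplacedFruits_alt
  by_cases hb : baskets = []
  · subst hb
    have : buildT [] = none := by simp [buildT]
    rw [this]
    simpa using fold_nil fruits 0
  · obtain ⟨t, hbuild, hw, htl⟩ := build_spec baskets hb
    rw [hbuild]
    have h := fold_eq fruits 0 t hw
    rw [htl] at h
    exact h.symm
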